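-- pv_equiv track=rewrite | github.com/rileydrellishak/adagrams-py | adagrams/game.py | score_word
-- ===== SOURCE A (Python) =====
-- def score_word(word):
--     """Calculate the score for a word.
--
--     Args:
--         word (str): The word submitted by a player.
--
--     Returns
--         int: score of word based on scoring guidelines for each letter.
--     """
--     SCORE_CHART = {
--     'A': 1, 'B': 3, 'C': 3, 'D': 2,
--     'E': 1, 'F': 4, 'G': 2, 'H': 4,
--     'I': 1, 'J': 8, 'K': 5, 'L': 1,
--     'M': 3, 'N': 1, 'O': 1, 'P': 3,
--     'Q': 10, 'R': 1, 'S': 1, 'T': 1,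
--     'U': 1, 'V': 4, 'W': 4,
--     'X': 8, 'Y': 4, 'Z': 10
--     }
--     score = 0
--     if len(word) >= 7 and len(word) <= 10:
--         score += 8
--
--     for letter in word.upper():
--         score += SCORE_CHART[letter]
--
--     return score
-- ===== SOURCE B (Python) =====
-- def score_word(word):
--     """Calculate the score for a word by counting occurrences per score tier."""
--     TIERS = [(1, "AEILNORSTU"), (2, "DG"), (3, "BCMP"),
--              (4, "FHVWY"), (5, "K"), (8, "JX"), (10, "QZ")]
--     u = word.upper()
--     total = sum(points * sum(u.count(letter) for letter in letters)
--                 for points, letters in TIERS)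
--     if 7 <= len(word) <= 10:
--         total += 8
--     return total
-- ===== Notes on version B (the rewrite author's own statement) =====
-- stated objective: alternative
-- what changed: B inverts the iteration: instead of scanning the word and looking each character up in the chart, it iterates over the seven score tiers of the alphabet and adds points * u.count(letter) for each letter of each tier; the 7..10 length bonus is unchanged.
import Mathlib
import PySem

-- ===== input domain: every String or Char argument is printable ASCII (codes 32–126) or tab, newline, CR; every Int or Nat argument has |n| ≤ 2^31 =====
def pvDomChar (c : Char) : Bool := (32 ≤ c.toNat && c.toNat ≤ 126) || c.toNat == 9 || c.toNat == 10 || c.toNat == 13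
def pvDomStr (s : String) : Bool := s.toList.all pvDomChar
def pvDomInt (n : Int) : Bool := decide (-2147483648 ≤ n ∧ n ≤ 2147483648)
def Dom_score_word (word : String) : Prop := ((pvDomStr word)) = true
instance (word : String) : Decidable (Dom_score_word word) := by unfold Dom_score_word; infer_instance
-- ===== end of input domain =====

-- B iterates over the seven score tiers of the alphabet, counting each letter's occurrences in the word, instead of A's per-character chart lookup (alternative decomposition, same asymptotic cost).

-- ===== PORT A =====
-- the SCORE_CHART dict literal of A
def pvScoreChartA : PySem.Dict Char Int := PySem.Dict.ofList
  [('A', 1), ('B', 3), ('C', 3), ('D', 2),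
   ('E', 1), ('F', 4), ('G', 2), ('H', 4),
   ('I', 1), ('J', 8), ('K', 5), ('L', 1),
   ('M', 3), ('N', 1), ('O', 1), ('P', 3),
   ('Q', 10), ('R', 1), ('S', 1), ('T', 1),
   ('U', 1), ('V', 4), ('W', 4),
   ('X', 8), ('Y', 4), ('Z', 10)]

-- SCORE_CHART[letter] raises KeyError on a missing key; Pre_ excludes that, so getD 0 is exact on Pre_
def score_word (word : String) : Int :=
  let score : Int := 0
  let score := if 7 ≤ PySem.Str.len word ∧ PySem.Str.len word ≤ 10 then score + 8 else score
  (PySem.Str.upper word).toList.foldl (fun s letter => s + pvScoreChartA.getD letter 0) score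

-- ===== PORT B =====
-- the TIERS list literal of B: (points, letters worth that many points)
def pvTiers : List (Int × List Char) :=
  [(1, "AEILNORSTU".toList), (2, "DG".toList), (3, "BCMP".toList),
   (4, "FHVWY".toList), (5, "K".toList), (8, "JX".toList), (10, "QZ".toList)]

def score_word_alt (word : String) : Int :=
  let u := (PySem.Str.upper word).toList
  let total : Int :=
    (pvTiers.map (fun p => p.1 * ((p.2.map (fun letter => (u.count letter : Int))).sum))).sum
  if 7 ≤ PySem.Str.len word ∧ PySem.Str.len word ≤ 10 then total + 8 else total

-- ===== PRECONDITION & SPEC =====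
-- A raises KeyError when any character of the word is not an ASCII letter; Pre_ excludes exactly those inputs.
def Pre_score_word (word : String) : Prop := word.toList.all PySem.Chars.isalpha = true
instance (word : String) : Decidable (Pre_score_word word) := by unfold Pre_score_word; infer_instance
def pvWitness_score_word : String := "Dog"
def Spec_score_word (word : String) (out : Int) : Prop := out = score_word_alt word
instance (word : String) (out : Int) : Decidable (Spec_score_word word out) := by unfold Spec_score_word; infer_instance

-- ===== CLAIM (what is proved, stated in full; the proofs are below) =====
def Claim_equal_score_word : Prop := ∀ (word : String), Dom_score_word word → Pre_score_word word → Spec_score_word word (score_word word)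

-- ===== LEMMAS AND PROOFS =====

-- B's per-character contribution: the points a single character earns across the tiers
def pvTierChar (c : Char) : Int :=
  (pvTiers.map (fun p => p.1 * (p.2.count c : Int))).sum

-- B's tier total is the sum of per-character tier contributions over the word

-- toNat of Char.ofNat below the surrogate range
theorem pv_toNat_ofNat (n : Nat) (h : n < 55296) : (Char.ofNat n).toNat = n := by
  have hv : Nat.isValidChar n := Or.inl h
  simp [Char.ofNat, hv]

-- indicator sum over a tier list is the count of c in it
theorem pv_ind_sum (ls : List Char) (c : Char) :
    (ls.map (fun letter => if c == letter then (1 : Int) else 0)).sum = (ls.count c : Int) := by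
  induction ls with
  | nil => simp
  | cons l ls ih =>
      simp only [List.map_cons, List.sum_cons, List.count_cons, ih]
      by_cases h : c = l
      · subst h; simp; omega
      · have h1 : (c == l) = false := by simp [h]
        simp [h1]
        exact fun hh => h hh.symm

-- one tier list: counting every letter of ls in (c :: u) is counting it in u, plus ls.count c for the new char
theorem pv_count_cons_sum (ls : List Char) (c : Char) (u : List Char) :
    (ls.map (fun letter => (((c :: u).count letter : Nat) : Int))).sum
      = (ls.map (fun letter => ((u.count letter : Nat) : Int))).sum + (ls.count c : Int) := by
  simp only [List.count_cons]
  push_cast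
  rw [PySem.List.sum_map_add_int, pv_ind_sum]

theorem pv_tier_total (u : List Char) :
    (pvTiers.map (fun p => p.1 * ((p.2.map (fun letter => (u.count letter : Int))).sum))).sum
      = (u.map pvTierChar).sum := by
  induction u with
  | nil => simp [pvTiers]
  | cons c u ih =>
      simp only [pv_count_cons_sum, mul_add, List.map_cons, List.sum_cons, ← ih, pvTierChar]
      rw [PySem.List.sum_map_add_int]
      ring

-- per-character agreement with A's chart, for any character with code < 128
theorem pv_char_eq (n : Nat) (h : n < 128) :
    pvTierChar (Char.ofNat n) = pvScoreChartA.getD (Char.ofNat n) 0 := by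
  interval_cases n <;> decide

theorem score_word_eq (word : String) (hdom : Dom_score_word word) :
    score_word word = score_word_alt word := by
  simp only [score_word, score_word_alt]
  rw [PySem.List.foldl_add, pv_tier_total]
  have hmap : ((PySem.Str.upper word).toList.map pvTierChar)
      = ((PySem.Str.upper word).toList.map (fun c => pvScoreChartA.getD c 0)) := by
    apply List.map_congr_left
    intro c hc
    have hlt : c.toNat < 128 := by
      have : ∀ x ∈ word.toList, pvDomChar x = true := by
        simpa [Dom_score_word, pvDomStr, List.all_eq_true] using hdom
      rw [PySem.Str.toList_upper, PySem.Chars.upper] at hc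
      obtain ⟨x, hx, rfl⟩ := List.mem_map.mp hc
      have hx' := this x hx
      simp only [pvDomChar, Bool.or_eq_true, Bool.and_eq_true, decide_eq_true_eq, beq_iff_eq] at hx'
      unfold PySem.Chars.upperChar
      split_ifs with hl
      · rw [pv_toNat_ofNat _ (by omega)]; omega
      · omega
    rw [← Char.ofNat_toNat c, pv_char_eq c.toNat hlt]
  rw [hmap]
  split_ifs <;> ring

-- ===== VERDICT (by name: the statement is the Claim_ definition above) =====
theorem score_word_spec : Claim_equal_score_word := by
  intro word hdom _
  exact score_word_eq word hdom
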